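-- pv_equiv track=rewrite | github.com/SHasHwatModi05/graphethon3.0_pharmacogenomic.0 | backend/rag_engine.py | generate_rule_based_answer
-- ===== SOURCE A (Python) =====
-- def generate_rule_based_answer(query: str, patient_context: str, retrieved_context: str) -> str:
--     """Generate answer based on retrieved content and query keywords"""
--     q_lower = query.lower()
--
--     all_context = f"{patient_context}\n{retrieved_context}".strip()
--
--     if not all_context:
--         return "I don't have enough information to answer this question. Please ensure the patient has medical records in the system."
--
--     # Answer templates based on query keywords
--     if any(w in q_lower for w in ['risk', 'drug', 'medication', 'genome', 'vcf', 'gene', 'pharmaco']):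
--         relevant_lines = [l for l in all_context.split('\n') if any(
--             w in l.lower() for w in ['prescription', 'drug', 'risk', 'genomic', 'analysis', 'gene', 'severity']
--         )]
--         if relevant_lines:
--             return f"Based on the pharmacogenomic data:\n\n" + "\n".join(relevant_lines[:5])
--
--     if any(w in q_lower for w in ['vital', 'heart', 'blood pressure', 'temperature', 'oxygen', 'bp', 'hr']):
--         relevant_lines = [l for l in all_context.split('\n') if any(
--             w in l.lower() for w in ['vital', 'hr=', 'bp=', 'temp=', 'spo2']
--         )]
--         if relevant_lines:
--             return f"Patient vitals information:\n\n" + "\n".join(relevant_lines[:5])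
--
--     if any(w in q_lower for w in ['allerg', 'condition', 'chronic', 'diagnosis']):
--         relevant_lines = [l for l in all_context.split('\n') if any(
--             w in l.lower() for w in ['allerg', 'chronic', 'condition', 'diagnosis', 'record']
--         )]
--         if relevant_lines:
--             return f"Medical background information:\n\n" + "\n".join(relevant_lines[:5])
--
--     if any(w in q_lower for w in ['history', 'past', 'previous', 'record']):
--         context_lines = [l for l in all_context.split('\n') if l.strip()]
--         return "Patient history summary:\n\n" + "\n".join(context_lines[:8])
--
--     # Generic fallback: return top context
--     context_lines = [l for l in all_context.split('\n') if l.strip()]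
--     if context_lines:
--         return "Based on available records:\n\n" + "\n".join(context_lines[:6])
--
--     return "No specific information found for this query. Please refine your question or add more patient records."
-- ===== SOURCE B (Python) =====
-- # Single-pass bucket classifier: instead of A's staged filter passes (one full
-- # scan of the lines per query branch), B scans the lines ONCE, sorting each line
-- # into all category buckets it matches (pharma / vitals / background / nonblank),
-- # then answers by a flat lookup over the pre-filled buckets.
--
-- def generate_rule_based_answer(query: str, patient_context: str, retrieved_context: str) -> str:
--     q = query.lower()
--     ctx = (patient_context + "\n" + retrieved_context).strip()
--     if not ctx:
--         return "I don't have enough information to answer this question. Please ensure the patient has medical records in the system."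
--     pharma, vitals, backg, nonblank = [], [], [], []
--     for l in ctx.split('\n'):
--         ll = l.lower()
--         if any(w in ll for w in ('prescription', 'drug', 'risk', 'genomic', 'analysis', 'gene', 'severity')):
--             pharma.append(l)
--         if any(w in ll for w in ('vital', 'hr=', 'bp=', 'temp=', 'spo2')):
--             vitals.append(l)
--         if any(w in ll for w in ('allerg', 'chronic', 'condition', 'diagnosis', 'record')):
--             backg.append(l)
--         if l.strip():
--             nonblank.append(l)
--     if pharma and any(w in q for w in ('risk', 'drug', 'medication', 'genome', 'vcf', 'gene', 'pharmaco')):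
--         return "Based on the pharmacogenomic data:\n\n" + "\n".join(pharma[:5])
--     if vitals and any(w in q for w in ('vital', 'heart', 'blood pressure', 'temperature', 'oxygen', 'bp', 'hr')):
--         return "Patient vitals information:\n\n" + "\n".join(vitals[:5])
--     if backg and any(w in q for w in ('allerg', 'condition', 'chronic', 'diagnosis')):
--         return "Medical background information:\n\n" + "\n".join(backg[:5])
--     if any(w in q for w in ('history', 'past', 'previous', 'record')):
--         return "Patient history summary:\n\n" + "\n".join(nonblank[:8])
--     if nonblank:
--         return "Based on available records:\n\n" + "\n".join(nonblank[:6])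
--     return "No specific information found for this query. Please refine your question or add more patient records."
-- ===== Notes on version B (the rewrite author's own statement) =====
-- stated objective: alternative
-- what changed: A's staged per-branch filter passes (each query branch re-scans all context lines) are replaced by a single-pass bucket classifier: one loop over the lines sorts each line into every category bucket it matches (pharma/vitals/background/nonblank), and the answer is then a flat lookup over the pre-filled buckets.
import Mathlib
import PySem

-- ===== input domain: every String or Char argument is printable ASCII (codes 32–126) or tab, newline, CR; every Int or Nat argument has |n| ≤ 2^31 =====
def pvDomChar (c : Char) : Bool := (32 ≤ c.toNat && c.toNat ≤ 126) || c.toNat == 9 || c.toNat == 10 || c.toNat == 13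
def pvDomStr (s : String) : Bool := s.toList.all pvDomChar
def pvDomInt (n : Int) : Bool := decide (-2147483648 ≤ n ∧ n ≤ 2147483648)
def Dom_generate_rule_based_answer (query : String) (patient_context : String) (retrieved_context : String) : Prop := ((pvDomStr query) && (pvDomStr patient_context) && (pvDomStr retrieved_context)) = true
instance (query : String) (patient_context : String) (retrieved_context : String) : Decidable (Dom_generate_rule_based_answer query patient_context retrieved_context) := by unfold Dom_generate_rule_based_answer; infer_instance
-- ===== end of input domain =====

-- B replaces A's staged per-branch filter passes by a single pass over the lines
-- that fills all category buckets at once, then answers by a flat lookup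
-- (objective: alternative; same cost).

-- `any(w in s for w in ws)` (used by both sources)
def pvAnyIn (ws : List (List Char)) (s : List Char) : Bool :=
  ws.any (fun w => PySem.Chars.isIn w s)

-- the keyword lists, literal from the sources (shared by both ports)
def pvTrig1 : List (List Char) := ["risk".toList, "drug".toList, "medication".toList, "genome".toList, "vcf".toList, "gene".toList, "pharmaco".toList]
def pvFilt1 : List (List Char) := ["prescription".toList, "drug".toList, "risk".toList, "genomic".toList, "analysis".toList, "gene".toList, "severity".toList]
def pvTrig2 : List (List Char) := ["vital".toList, "heart".toList, "blood pressure".toList, "temperature".toList, "oxygen".toList, "bp".toList, "hr".toList]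
def pvFilt2 : List (List Char) := ["vital".toList, "hr=".toList, "bp=".toList, "temp=".toList, "spo2".toList]
def pvTrig3 : List (List Char) := ["allerg".toList, "condition".toList, "chronic".toList, "diagnosis".toList]
def pvFilt3 : List (List Char) := ["allerg".toList, "chronic".toList, "condition".toList, "diagnosis".toList, "record".toList]
def pvTrigHist : List (List Char) := ["history".toList, "past".toList, "previous".toList, "record".toList]

-- ===== PORT A =====
-- A's last two blocks (history branch, then generic fallback), in source order.
def pvA_tail (q_lower all_context : List Char) : List Char :=
  if pvAnyIn pvTrigHist q_lower then
    let context_lines := List.filter (fun l => PySem.Chars.strip l ≠ []) (PySem.Chars.splitOn all_context ['\n'])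
    "Patient history summary:\n\n".toList ++ PySem.Chars.join ['\n'] (context_lines.take 8)
  else
    let context_lines := List.filter (fun l => PySem.Chars.strip l ≠ []) (PySem.Chars.splitOn all_context ['\n'])
    if context_lines ≠ [] then
      "Based on available records:\n\n".toList ++ PySem.Chars.join ['\n'] (context_lines.take 6)
    else
      "No specific information found for this query. Please refine your question or add more patient records.".toList

-- A's third keyword branch, falling through to the tail.
def pvA_step3 (q_lower all_context : List Char) : List Char :=
  if pvAnyIn pvTrig3 q_lower then
    let relevant_lines := List.filter (fun l => pvAnyIn pvFilt3 (PySem.Chars.lower l)) (PySem.Chars.splitOn all_context ['\n'])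
    if relevant_lines ≠ [] then
      "Medical background information:\n\n".toList ++ PySem.Chars.join ['\n'] (relevant_lines.take 5)
    else pvA_tail q_lower all_context
  else pvA_tail q_lower all_context

-- A's second keyword branch.
def pvA_step2 (q_lower all_context : List Char) : List Char :=
  if pvAnyIn pvTrig2 q_lower then
    let relevant_lines := List.filter (fun l => pvAnyIn pvFilt2 (PySem.Chars.lower l)) (PySem.Chars.splitOn all_context ['\n'])
    if relevant_lines ≠ [] then
      "Patient vitals information:\n\n".toList ++ PySem.Chars.join ['\n'] (relevant_lines.take 5)
    else pvA_step3 q_lower all_context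
  else pvA_step3 q_lower all_context

def generate_rule_based_answer (query : String) (patient_context : String) (retrieved_context : String) : String :=
  let q_lower := PySem.Chars.lower query.toList
  let all_context := PySem.Chars.strip (patient_context.toList ++ '\n' :: retrieved_context.toList)
  if all_context = [] then
    "I don't have enough information to answer this question. Please ensure the patient has medical records in the system."
  else
    String.ofList (
      if pvAnyIn pvTrig1 q_lower then
        let relevant_lines := List.filter (fun l => pvAnyIn pvFilt1 (PySem.Chars.lower l)) (PySem.Chars.splitOn all_context ['\n'])
        if relevant_lines ≠ [] then
          "Based on the pharmacogenomic data:\n\n".toList ++ PySem.Chars.join ['\n'] (relevant_lines.take 5)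
        else pvA_step2 q_lower all_context
      else pvA_step2 q_lower all_context)

-- ===== PORT B =====
-- the body of B's single `for l in ctx.split('\n')` loop: sort `l` into every
-- bucket (pharma, vitals, backg, nonblank) it matches
def pvBucketStep (acc : List (List Char) × List (List Char) × List (List Char) × List (List Char))
    (l : List Char) : List (List Char) × List (List Char) × List (List Char) × List (List Char) :=
  let ll := PySem.Chars.lower l
  (if pvAnyIn pvFilt1 ll then acc.1 ++ [l] else acc.1,
   if pvAnyIn pvFilt2 ll then acc.2.1 ++ [l] else acc.2.1,
   if pvAnyIn pvFilt3 ll then acc.2.2.1 ++ [l] else acc.2.2.1,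
   if PySem.Chars.strip l ≠ [] then acc.2.2.2 ++ [l] else acc.2.2.2)

def generate_rule_based_answer_alt (query : String) (patient_context : String) (retrieved_context : String) : String :=
  let q := PySem.Chars.lower query.toList
  let ctx := PySem.Chars.strip (patient_context.toList ++ '\n' :: retrieved_context.toList)
  if ctx = [] then
    "I don't have enough information to answer this question. Please ensure the patient has medical records in the system."
  else
    let buckets := (PySem.Chars.splitOn ctx ['\n']).foldl pvBucketStep ([], [], [], [])
    let pharma := buckets.1
    let vitals := buckets.2.1
    let backg := buckets.2.2.1
    let nonblank := buckets.2.2.2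
    if pharma ≠ [] ∧ pvAnyIn pvTrig1 q then
      String.ofList ("Based on the pharmacogenomic data:\n\n".toList ++ PySem.Chars.join ['\n'] (pharma.take 5))
    else if vitals ≠ [] ∧ pvAnyIn pvTrig2 q then
      String.ofList ("Patient vitals information:\n\n".toList ++ PySem.Chars.join ['\n'] (vitals.take 5))
    else if backg ≠ [] ∧ pvAnyIn pvTrig3 q then
      String.ofList ("Medical background information:\n\n".toList ++ PySem.Chars.join ['\n'] (backg.take 5))
    else if pvAnyIn pvTrigHist q then
      String.ofList ("Patient history summary:\n\n".toList ++ PySem.Chars.join ['\n'] (nonblank.take 8))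
    else if nonblank ≠ [] then
      String.ofList ("Based on available records:\n\n".toList ++ PySem.Chars.join ['\n'] (nonblank.take 6))
    else
      "No specific information found for this query. Please refine your question or add more patient records."

-- ===== PRECONDITION & SPEC =====
def Spec_generate_rule_based_answer (query : String) (patient_context : String) (retrieved_context : String) (out : String) : Prop := out = generate_rule_based_answer_alt query patient_context retrieved_context
instance (query : String) (patient_context : String) (retrieved_context : String) (out : String) : Decidable (Spec_generate_rule_based_answer query patient_context retrieved_context out) := by unfold Spec_generate_rule_based_answer; infer_instance

-- ===== CLAIM (what is proved, stated in full; the proofs are below) =====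
def Claim_equal_generate_rule_based_answer : Prop := ∀ (query : String) (patient_context : String) (retrieved_context : String), Dom_generate_rule_based_answer query patient_context retrieved_context → Spec_generate_rule_based_answer query patient_context retrieved_context (generate_rule_based_answer query patient_context retrieved_context)

-- ===== LEMMAS AND PROOFS =====

-- the single-pass fold fills each bucket with the corresponding filter
theorem pvBuckets (lines : List (List Char))
    (p v b n : List (List Char)) :
    lines.foldl pvBucketStep (p, v, b, n) =
      (p ++ List.filter (fun l => pvAnyIn pvFilt1 (PySem.Chars.lower l)) lines,
       v ++ List.filter (fun l => pvAnyIn pvFilt2 (PySem.Chars.lower l)) lines,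
       b ++ List.filter (fun l => pvAnyIn pvFilt3 (PySem.Chars.lower l)) lines,
       n ++ List.filter (fun l => decide (PySem.Chars.strip l ≠ [])) lines) := by
  induction lines generalizing p v b n with
  | nil => simp
  | cons hd tl ih =>
    simp only [List.foldl_cons, pvBucketStep, List.filter_cons]
    rw [ih]
    by_cases h1 : pvAnyIn pvFilt1 (PySem.Chars.lower hd) = true <;>
      by_cases h2 : pvAnyIn pvFilt2 (PySem.Chars.lower hd) = true <;>
        by_cases h3 : pvAnyIn pvFilt3 (PySem.Chars.lower hd) = true <;>
          by_cases h4 : PySem.Chars.strip hd ≠ [] <;>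
            simp [h1, h2, h3, h4]

-- `if b: if P: x else y else y` = `if P ∧ b: x else y`
theorem pvFlip {α : Type} (b : Bool) (P : Prop) [Decidable P] (x y : α) :
    (if b = true then (if P then x else y) else y) = if P ∧ b = true then x else y := by
  by_cases hb : b = true <;> by_cases hp : P <;> simp [hb, hp]

-- A's tail as the flat history / fallback / give-up chain
theorem pvTail_eq (q ac : List Char) :
    String.ofList (pvA_tail q ac) =
    (if pvAnyIn pvTrigHist q then
      String.ofList ("Patient history summary:\n\n".toList ++ PySem.Chars.join ['\n'] ((List.filter (fun l => decide (PySem.Chars.strip l ≠ [])) (PySem.Chars.splitOn ac ['\n'])).take 8))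
    else if List.filter (fun l => decide (PySem.Chars.strip l ≠ [])) (PySem.Chars.splitOn ac ['\n']) ≠ [] then
      String.ofList ("Based on available records:\n\n".toList ++ PySem.Chars.join ['\n'] ((List.filter (fun l => decide (PySem.Chars.strip l ≠ [])) (PySem.Chars.splitOn ac ['\n'])).take 6))
    else
      "No specific information found for this query. Please refine your question or add more patient records.") := by
  unfold pvA_tail
  by_cases hh : pvAnyIn pvTrigHist q = true
  · simp only [hh, if_true]
  · simp only [Bool.not_eq_true] at hh
    simp only [hh, Bool.false_eq_true, if_false]
    by_cases hn : List.filter (fun l => decide (PySem.Chars.strip l ≠ [])) (PySem.Chars.splitOn ac ['\n']) = []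
    · simp only [hn, ne_eq, not_true_eq_false, if_false]
      exact String.ofList_toList
    · simp only [hn, ne_eq, not_false_eq_true, if_true]

-- A's third branch flattened
theorem pvStep3_eq (q ac : List Char) :
    String.ofList (pvA_step3 q ac) =
    (if List.filter (fun l => pvAnyIn pvFilt3 (PySem.Chars.lower l)) (PySem.Chars.splitOn ac ['\n']) ≠ [] ∧ pvAnyIn pvTrig3 q = true then
      String.ofList ("Medical background information:\n\n".toList ++ PySem.Chars.join ['\n'] ((List.filter (fun l => pvAnyIn pvFilt3 (PySem.Chars.lower l)) (PySem.Chars.splitOn ac ['\n'])).take 5))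
    else String.ofList (pvA_tail q ac)) := by
  unfold pvA_step3
  rw [apply_ite String.ofList, apply_ite String.ofList, pvFlip]

-- A's second branch flattened
theorem pvStep2_eq (q ac : List Char) :
    String.ofList (pvA_step2 q ac) =
    (if List.filter (fun l => pvAnyIn pvFilt2 (PySem.Chars.lower l)) (PySem.Chars.splitOn ac ['\n']) ≠ [] ∧ pvAnyIn pvTrig2 q = true then
      String.ofList ("Patient vitals information:\n\n".toList ++ PySem.Chars.join ['\n'] ((List.filter (fun l => pvAnyIn pvFilt2 (PySem.Chars.lower l)) (PySem.Chars.splitOn ac ['\n'])).take 5))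
    else String.ofList (pvA_step3 q ac)) := by
  unfold pvA_step2
  rw [apply_ite String.ofList, apply_ite String.ofList, pvFlip]

-- ===== VERDICT (by name: the statement is the Claim_ definition above) =====
theorem generate_rule_based_answer_spec : Claim_equal_generate_rule_based_answer := by
  intro query patient_context retrieved_context _
  unfold Spec_generate_rule_based_answer generate_rule_based_answer generate_rule_based_answer_alt
  by_cases h0 : PySem.Chars.strip (patient_context.toList ++ '\n' :: retrieved_context.toList) = []
  · simp only [h0, if_true]
  · simp only [h0, if_false]
    rw [pvBuckets]
    simp only [List.nil_append]
    rw [apply_ite String.ofList, apply_ite String.ofList, pvFlip,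
        pvStep2_eq, pvStep3_eq, pvTail_eq]
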